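-- pv_equiv track=rewrite | github.com/toli18/volley-platform | backend/app/services/hybrid_training_generator.py | _parse_players_bounds
-- ===== SOURCE A (Python) =====
-- from typing import Any, Dict, Iterable, List, Optional, Sequence, Set, Tuple
--
-- def _safe_str(v: Any) -> str:
--     return str(v).strip() if v is not None else ""
--
-- def _norm(v: Any) -> str:
--     return _safe_str(v).lower()
--
-- def _parse_players_bounds(v: Any) -> Tuple[Optional[int], Optional[int], bool]:
--     s = _norm(v)
--     if not s or s in {"няма данни", "unknown", "n/a", "-"}:
--         return None, None, False
--     nums: List[int] = []
--     cur = ""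
--     for ch in s:
--         if ch.isdigit():
--             cur += ch
--         elif cur:
--             nums.append(int(cur))
--             cur = ""
--     if cur:
--         nums.append(int(cur))
--     if not nums:
--         return None, None, False
--     if len(nums) == 1:
--         return nums[0], nums[0], True
--     return min(nums), max(nums), True
-- ===== SOURCE B (Python) =====
-- from typing import Any, Optional, Tuple
--
--
-- def _parse_players_bounds(v: Any) -> Tuple[Optional[int], Optional[int], bool]:
--     s = str(v).strip().lower() if v is not None else ""
--     if not s or s in {"няма данни", "unknown", "n/a", "-"}:
--         return None, None, False
--     masked = "".join(ch if ch.isdigit() else " " for ch in s)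
--     nums = [int(tok) for tok in masked.split()]
--     if not nums:
--         return None, None, False
--     return min(nums), max(nums), True
-- ===== Notes on version B (the rewrite author's own statement) =====
-- stated objective: simpler
-- what changed: Replaces A's stateful character-by-character accumulator loop (mutable cur/nums with mid-loop and post-loop flushes) and its len==1 special case by staged passes: mask every non-digit to a space, tokenize with str.split(), parse the tokens, and return min/max unconditionally (min=max on a singleton).
import Mathlib
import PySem

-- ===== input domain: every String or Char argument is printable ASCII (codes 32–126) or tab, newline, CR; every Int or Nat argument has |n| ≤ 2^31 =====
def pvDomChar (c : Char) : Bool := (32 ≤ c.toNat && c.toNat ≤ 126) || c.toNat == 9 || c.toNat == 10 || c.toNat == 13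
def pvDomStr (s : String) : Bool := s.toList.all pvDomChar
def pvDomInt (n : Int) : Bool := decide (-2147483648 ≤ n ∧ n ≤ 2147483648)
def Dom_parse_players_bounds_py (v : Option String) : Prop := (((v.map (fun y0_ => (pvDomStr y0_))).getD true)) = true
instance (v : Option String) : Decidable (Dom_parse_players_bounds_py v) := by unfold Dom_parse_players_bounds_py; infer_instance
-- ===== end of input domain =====

-- B replaces A's stateful accumulator loop (mutable cur/nums with two flush sites) and its
-- len==1 branch by staged passes: mask non-digits to spaces, str.split(), parse, min/max.

-- shared helpers (both Pythons normalize with _norm, test the sentinel set, and int() a digit run)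
-- _norm(v): str(v).strip().lower() when v is a string, "" when v is None
def pvNorm (v : Option String) : List Char :=
  match v with
  | none => []
  | some x => PySem.Chars.lower (PySem.Chars.strip x.toList)

-- int(cur) where cur is a nonempty run of ASCII digits: PySem.Int.ofChars? never returns none there
def pvIntOfRun (cs : List Char) : Int := (PySem.Int.ofChars? cs).getD 0

def pvSentinel (s : List Char) : Bool :=
  s = [] || s = "няма данни".toList || s = "unknown".toList || s = "n/a".toList || s = "-".toList

-- ===== PORT A =====
-- literal transliteration of A's accumulator loop: state (nums, cur) stepped by pvStep,
-- the trailing 'if cur: nums.append(int(cur))' flush is pvFlush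
def pvStep (acc : List Int × List Char) (ch : Char) : List Int × List Char :=
  if PySem.Chars.isdigit ch then (acc.1, acc.2 ++ [ch])
  else if acc.2 ≠ [] then (acc.1 ++ [pvIntOfRun acc.2], []) else acc

def pvFlush (st : List Int × List Char) : List Int :=
  if st.2 ≠ [] then st.1 ++ [pvIntOfRun st.2] else st.1

def parse_players_bounds_py (v : Option String) : Option Int × Option Int × Bool :=
  let s := pvNorm v
  if pvSentinel s then (none, none, false)
  else
    let nums := pvFlush (s.foldl pvStep ([], []))
    match nums with
    | [] => (none, none, false)
    | [n] => (some n, some n, true)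
    | _ => ((PySem.List.min? nums (fun x => x)), (PySem.List.max? nums (fun x => x)), true)

-- ===== PORT B =====
-- "".join(ch if ch.isdigit() else " " for ch in s)
def pvMask (s : List Char) : List Char :=
  s.map (fun c => if PySem.Chars.isdigit c then c else ' ')

def parse_players_bounds_py_alt (v : Option String) : Option Int × Option Int × Bool :=
  let s := pvNorm v
  if pvSentinel s then (none, none, false)
  else
    let nums := (PySem.Chars.split₀ (pvMask s)).map pvIntOfRun  -- masked.split() then int() each token
    if nums.isEmpty then (none, none, false)
    else ((PySem.List.min? nums (fun x => x)), (PySem.List.max? nums (fun x => x)), true)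

-- ===== PRECONDITION & SPEC =====
def Spec_parse_players_bounds_py (v : Option String) (out : Option Int × Option Int × Bool) : Prop := out = parse_players_bounds_py_alt v
instance (v : Option String) (out : Option Int × Option Int × Bool) : Decidable (Spec_parse_players_bounds_py v out) := by unfold Spec_parse_players_bounds_py; infer_instance

-- ===== CLAIM (what is proved, stated in full; the proofs are below) =====
def Claim_equal_parse_players_bounds_py : Prop := ∀ (v : Option String), Dom_parse_players_bounds_py v → Spec_parse_players_bounds_py v (parse_players_bounds_py v)

-- ===== LEMMAS AND PROOFS =====

-- reference recursion: the list of maximal digit runs of l, as ints, with pending run cur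
def pvScan (cur : List Char) : List Char → List Int
  | [] => if cur ≠ [] then [pvIntOfRun cur] else []
  | c :: cs =>
    if PySem.Chars.isdigit c then pvScan (cur ++ [c]) cs
    else if cur ≠ [] then pvIntOfRun cur :: pvScan [] cs else pvScan [] cs

-- A's loop computes pvScan
theorem scan_of_foldl (l : List Char) : ∀ (acc : List Int) (cur : List Char),
    pvFlush (l.foldl pvStep (acc, cur)) = acc ++ pvScan cur l := by
  induction l with
  | nil =>
    intro acc cur
    simp only [List.foldl_nil, pvScan, pvFlush]
    by_cases h : cur = [] <;> simp [h]
  | cons c cs ih =>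
    intro acc cur
    simp only [List.foldl_cons, pvScan]
    by_cases hd : PySem.Chars.isdigit c
    · rw [show pvStep (acc, cur) c = (acc, cur ++ [c]) by simp [pvStep, hd]]
      simp [hd, ih]
    · by_cases hc : cur = []
      · rw [show pvStep (acc, cur) c = (acc, cur) by simp [pvStep, hd, hc]]
        simp [hd, hc, ih]
      · rw [show pvStep (acc, cur) c = (acc ++ [pvIntOfRun cur], []) by simp [pvStep, hd, hc]]
        simp [hd, hc, ih]

theorem isdigit_not_space (c : Char) (h : PySem.Chars.isdigit c = true) :
    PySem.Chars.isspace c = false := by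
  simp only [PySem.Chars.isdigit, Bool.and_eq_true, decide_eq_true_eq, Char.le_def] at h
  simp only [PySem.Chars.isspace, Char.toNat]
  have h1 : 48 ≤ c.val.toNat := h.1
  have h2 : c.val.toNat ≤ 57 := h.2
  simp only [Bool.or_eq_false_iff, Bool.and_eq_false_iff, decide_eq_false_iff_not]
  omega

-- B's mask + split() computes pvScan (cur is go's pending token, reversed)
theorem scan_of_split_go (l : List Char) : ∀ (cur : List Char) (acc : List (List Char)),
    (PySem.Chars.split₀.go (pvMask l) cur acc).map pvIntOfRun
      = (acc.reverse.map pvIntOfRun) ++ pvScan cur.reverse l := by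
  induction l with
  | nil =>
    intro cur acc
    simp only [pvMask, List.map_nil, PySem.Chars.split₀.go, pvScan]
    by_cases h : cur = []
    · simp [h]
    · have : cur.isEmpty = false := by simp [h]
      simp [this, h]
  | cons c cs ih =>
    intro cur acc
    have hm : pvMask (c :: cs) = (if PySem.Chars.isdigit c then c else ' ') :: pvMask cs := rfl
    rw [hm]
    by_cases hd : PySem.Chars.isdigit c = true
    · have hs := isdigit_not_space c hd
      rw [if_pos hd, PySem.Chars.split₀.go]
      simp only [hs, Bool.false_eq_true, if_false]
      rw [ih (c :: cur) acc]
      have : pvScan cur.reverse (c :: cs) = pvScan (cur.reverse ++ [c]) cs := by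
        rw [pvScan]; simp [hd]
      rw [this]
      simp
    · have hdf : PySem.Chars.isdigit c = false := by simpa using hd
      have hsp : PySem.Chars.isspace ' ' = true := by decide
      rw [if_neg hd, PySem.Chars.split₀.go]
      simp only [hsp, if_true]
      by_cases hc : cur = []
      · subst hc
        simp only [List.isEmpty_nil, if_true]
        rw [ih [] acc]
        rw [show pvScan ([] : List Char).reverse (c :: cs) = pvScan [] cs by
          rw [pvScan]; simp [hdf]]
        simp
      · have hce : cur.isEmpty = false := by simp [hc]
        simp only [hce, Bool.false_eq_true, if_false]
        rw [ih [] (cur.reverse :: acc)]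
        rw [show pvScan cur.reverse (c :: cs) = pvIntOfRun cur.reverse :: pvScan [] cs by
          rw [pvScan]; simp [hdf, hc]]
        simp

-- ===== VERDICT (by name: the statement is the Claim_ definition above) =====
theorem parse_players_bounds_py_spec : Claim_equal_parse_players_bounds_py := by
  intro v _
  unfold Spec_parse_players_bounds_py parse_players_bounds_py parse_players_bounds_py_alt
  by_cases hs : pvSentinel (pvNorm v) = true
  · simp [hs]
  · have h : pvFlush ((pvNorm v).foldl pvStep ([], [])) =
        (PySem.Chars.split₀ (pvMask (pvNorm v))).map pvIntOfRun := by
      rw [scan_of_foldl (pvNorm v) [] [], PySem.Chars.split₀, scan_of_split_go (pvNorm v) [] []]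
      simp
    simp only [hs, Bool.false_eq_true, if_false, h]
    generalize (PySem.Chars.split₀ (pvMask (pvNorm v))).map pvIntOfRun = nums
    rcases nums with _ | ⟨n, _ | ⟨m, t⟩⟩
    · rfl
    · simp [PySem.List.min?, PySem.List.max?]
    · simp [PySem.List.min?, PySem.List.max?]
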